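-- pv_equiv track=rewrite | github.com/iamtowbee/sloughGPT | domains/ai_personality.py | _make_casual
-- ===== SOURCE A (Python) =====
-- def _make_casual(text: str) -> str:
--     """Make text more casual"""
--     replacements = {
--         "Certainly": "Sure",
--         "Furthermore": "Also",
--         "Therefore": "So",
--         "However": "But",
--         "Additionally": "Plus",
--     }
--     for formal, casual in replacements.items():
--         text = text.replace(formal, casual)
--     return text
-- ===== SOURCE B (Python) =====
-- def _make_casual(text: str) -> str:
--     """Make text more casual"""
--     # Single left-to-right pass: dispatch on the first character (all five
--     # formal words start with distinct letters), instead of five full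
--     # text.replace passes.
--     table = {
--         "C": ("Certainly", "Sure"),
--         "F": ("Furthermore", "Also"),
--         "T": ("Therefore", "So"),
--         "H": ("However", "But"),
--         "A": ("Additionally", "Plus"),
--     }
--     out = []
--     i = 0
--     n = len(text)
--     while i < n:
--         hit = table.get(text[i])
--         if hit is not None and text.startswith(hit[0], i):
--             out.append(hit[1])
--             i += len(hit[0])
--         else:
--             out.append(text[i])
--             i += 1
--     return "".join(out)
-- ===== Notes on version B (the rewrite author's own statement) =====
-- stated objective: alternative
-- what changed: Replaced five sequential full-text str.replace passes by a single left-to-right scan that dispatches on the first character (the five formal words start with distinct letters) and emits the casual word or the original character; equivalent because no word can start inside another match or inside a replacement.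
import Mathlib
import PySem

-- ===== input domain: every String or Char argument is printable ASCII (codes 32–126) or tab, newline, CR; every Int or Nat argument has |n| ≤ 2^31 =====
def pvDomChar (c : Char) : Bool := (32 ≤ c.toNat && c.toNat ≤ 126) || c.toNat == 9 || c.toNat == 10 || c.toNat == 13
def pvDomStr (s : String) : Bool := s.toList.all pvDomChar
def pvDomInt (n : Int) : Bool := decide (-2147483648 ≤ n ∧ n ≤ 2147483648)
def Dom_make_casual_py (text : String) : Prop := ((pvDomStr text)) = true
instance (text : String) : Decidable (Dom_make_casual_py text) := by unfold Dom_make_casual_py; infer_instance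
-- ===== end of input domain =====

-- B replaces A's five sequential full-text str.replace passes by a single left-to-right
-- scan dispatching on the first character (the five formal words start with distinct
-- letters); objective: alternative (same result, one pass instead of five).

-- ===== PORT A =====
-- A: text = text.replace(formal, casual) for each of the five dict entries, in dict order.
def make_casual_py (text : String) : String :=
  let t1 := PySem.Str.replace text "Certainly" "Sure"
  let t2 := PySem.Str.replace t1 "Furthermore" "Also"
  let t3 := PySem.Str.replace t2 "Therefore" "So"
  let t4 := PySem.Str.replace t3 "However" "But"
  let t5 := PySem.Str.replace t4 "Additionally" "Plus"
  t5

-- ===== PORT B =====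
-- B: table.get(text[i]) — the first-character dispatch table.
def casualHit (c : Char) : Option (List Char × List Char) :=
  if c = 'C' then some ("Certainly".toList, "Sure".toList)
  else if c = 'F' then some ("Furthermore".toList, "Also".toList)
  else if c = 'T' then some ("Therefore".toList, "So".toList)
  else if c = 'H' then some ("However".toList, "But".toList)
  else if c = 'A' then some ("Additionally".toList, "Plus".toList)
  else none

-- B's while loop: one pass; at each position consult the table, on a hit emit the
-- casual word and skip the formal word, otherwise emit the character.
def casualScan (cs : List Char) : List Char :=
  match cs with
  | [] => []
  | c :: t =>
    match casualHit c with
    | some (f, v) =>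
      -- i += len(formal): skip the rest of the matched word (every table key is nonempty)
      if f.isPrefixOf (c :: t) then v ++ casualScan (t.drop (f.length - 1))
      else c :: casualScan t
    | none => c :: casualScan t
termination_by cs.length
decreasing_by
  all_goals (simp; try omega)

def make_casual_py_alt (text : String) : String := String.ofList (casualScan text.toList)

-- ===== PRECONDITION & SPEC =====
def Spec_make_casual_py (text : String) (out : String) : Prop := out = make_casual_py_alt text
instance (text : String) (out : String) : Decidable (Spec_make_casual_py text out) := by unfold Spec_make_casual_py; infer_instance

-- ===== CLAIM (what is proved, stated in full; the proofs are below) =====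
def Claim_equal_make_casual_py : Prop := ∀ (text : String), Dom_make_casual_py text → Spec_make_casual_py text (make_casual_py text)

-- ===== LEMMAS AND PROOFS =====

-- Simple recursive characterisation of Python's str.replace (old ≠ '') on char lists.
def replAll (k v : List Char) (cs : List Char) : List Char :=
  match cs with
  | [] => []
  | c :: t =>
    if k.isPrefixOf (c :: t) then v ++ replAll k v (t.drop (k.length - 1))
    else c :: replAll k v t
termination_by cs.length
decreasing_by
  · simp
  · simp

theorem replAll_go (k v : List Char) (hk : k ≠ []) :
    ∀ fuel l acc, l.length ≤ fuel →
      PySem.Chars.replace.go k v fuel l acc = acc.reverse ++ replAll k v l := by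
  intro fuel
  induction fuel with
  | zero =>
    intro l acc hl
    rw [PySem.Chars.replace.go.eq_def]
    have : l = [] := by cases l <;> simp_all
    subst this
    simp [replAll]
  | succ n ih =>
    intro l acc hl
    rw [PySem.Chars.replace.go.eq_def]
    cases l with
    | nil => simp [replAll]
    | cons c t =>
      rw [replAll]
      by_cases hp : k.isPrefixOf (c :: t)
      · simp only [hp, if_true]
        have hkl : 0 < k.length := by cases k <;> simp_all
        have hdrop : List.drop k.length (c :: t) = t.drop (k.length - 1) := by
          cases hK : k.length with
          | zero => omega
          | succ m => simp
        rw [hdrop]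
        simp at hl
        rw [ih (t.drop (k.length - 1)) (v.reverse ++ acc) (by simp; omega)]
        simp
      · simp only [hp]
        simp at hl
        rw [ih t (c :: acc) (by omega)]
        simp

theorem replace_eq_replAll (s k v : List Char) (hk : k ≠ []) :
    PySem.Chars.replace s k v = replAll k v s := by
  unfold PySem.Chars.replace
  have : k.isEmpty = false := by cases k <;> simp_all
  rw [this]
  simp only [Bool.false_eq_true, if_false]
  simpa using replAll_go k v hk s.length s [] le_rfl

-- step when the key itself is the prefix
theorem replAll_self (k v u : List Char) (hk : k ≠ []) :
    replAll k v (k ++ u) = v ++ replAll k v u := by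
  cases k with
  | nil => exact absurd rfl hk
  | cons kc k' =>
    rw [show (kc :: k') ++ u = kc :: (k' ++ u) from rfl, replAll]
    have hp : (kc :: k').isPrefixOf (kc :: (k' ++ u)) = true := by
      rw [List.isPrefixOf_iff_prefix]
      exact List.prefix_append _ _
    simp only [hp, if_true]
    simp

-- step when the key is not a prefix
theorem replAll_step_neg (k v : List Char) (c : Char) (t : List Char)
    (h : ¬ k <+: (c :: t)) : replAll k v (c :: t) = c :: replAll k v t := by
  rw [replAll]
  have : k.isPrefixOf (c :: t) = false := by
    rw [← Bool.not_eq_true, List.isPrefixOf_iff_prefix]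
    exact h
  simp [this]

-- step when the key's first character differs from the head
theorem replAll_head_ne (k v : List Char) (kc c : Char) (t : List Char)
    (hh : k.head? = some kc) (hne : kc ≠ c) :
    replAll k v (c :: t) = c :: replAll k v t := by
  apply replAll_step_neg
  intro hp
  cases k with
  | nil => simp at hh
  | cons a b =>
    rw [List.cons_prefix_cons] at hp
    simp at hh
    exact hne (hh ▸ hp.1)

-- pass-through: no occurrence of k can start inside a (checked positionally), so
-- replace leaves the prefix a of a ++ b untouched
theorem replAll_append (k v a b : List Char)
    (h : ∀ i < a.length, ¬ (k.take (a.length - i)) <+: (a.drop i)) :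
    replAll k v (a ++ b) = a ++ replAll k v b := by
  induction a with
  | nil => simp
  | cons x a' ih =>
    rw [show (x :: a') ++ b = x :: (a' ++ b) from rfl]
    have hnp : ¬ k <+: x :: (a' ++ b) := by
      intro hp
      have h0 := h 0 (by simp)
      simp only [Nat.sub_zero, List.drop_zero] at h0
      exact h0 (by simpa using (hp.take (x :: a').length))
    rw [replAll_step_neg _ _ _ _ hnp,
        ih (fun i hi => by
          have := h (i + 1) (by simp; omega)
          simpa using this)]
    simp

-- prefix reflection: a prefix s that avoids v's first character survives replace backwards
theorem replAll_prefix_reflect (k v : List Char) (hv : v ≠ []) :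
    ∀ n t s, t.length ≤ n → (∀ x ∈ s, v.head? ≠ some x) →
      s <+: replAll k v t → s <+: t := by
  intro n
  induction n with
  | zero =>
    intro t s ht hs hp
    have : t = [] := by cases t <;> simp_all
    subst this
    simp [replAll] at hp
    simp [hp]
  | succ m ih =>
    intro t s ht hs hp
    cases t with
    | nil => simpa [replAll] using hp
    | cons c t' =>
      by_cases hk : k <+: (c :: t')
      · rw [replAll] at hp
        have hkb : k.isPrefixOf (c :: t') = true := List.isPrefixOf_iff_prefix.mpr hk
        simp only [hkb, if_true] at hp
        cases s with
        | nil => exact List.nil_prefix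
        | cons x s' =>
          exfalso
          cases v with
          | nil => exact hv rfl
          | cons vh v' =>
            have : x = vh := by
              rcases hp with ⟨r, hr⟩
              simpa using (congrArg List.head? hr.symm).symm
            exact hs x (by simp) (by simp [this])
      · rw [replAll_step_neg _ _ _ _ hk] at hp
        cases s with
        | nil => exact List.nil_prefix
        | cons x s' =>
          rw [List.cons_prefix_cons] at hp ⊢
          refine ⟨hp.1, ?_⟩
          exact ih t' s' (by simp at ht; omega) (fun x hx => hs x (by simp [hx])) hp.2

-- the A-side pipeline on char lists
def chainR (cs : List Char) : List Char :=
  replAll "Additionally".toList "Plus".toList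
    (replAll "However".toList "But".toList
      (replAll "Therefore".toList "So".toList
        (replAll "Furthermore".toList "Also".toList
          (replAll "Certainly".toList "Sure".toList cs))))

theorem replAll_nil (k v : List Char) : replAll k v [] = [] := by
  rw [replAll.eq_def]

-- consuming steps of the pipeline, one per keyword
theorem chain_k1 (u : List Char) :
    chainR ("Certainly".toList ++ u) = "Sure".toList ++ chainR u := by
  unfold chainR
  rw [replAll_self _ _ _ (by decide),
      replAll_append _ _ "Sure".toList _ (by decide),
      replAll_append _ _ "Sure".toList _ (by decide),
      replAll_append _ _ "Sure".toList _ (by decide),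
      replAll_append _ _ "Sure".toList _ (by decide)]

theorem chain_k2 (u : List Char) :
    chainR ("Furthermore".toList ++ u) = "Also".toList ++ chainR u := by
  unfold chainR
  rw [replAll_append _ _ "Furthermore".toList _ (by decide),
      replAll_self _ _ _ (by decide),
      replAll_append _ _ "Also".toList _ (by decide),
      replAll_append _ _ "Also".toList _ (by decide),
      replAll_append _ _ "Also".toList _ (by decide)]

theorem chain_k3 (u : List Char) :
    chainR ("Therefore".toList ++ u) = "So".toList ++ chainR u := by
  unfold chainR
  rw [replAll_append _ _ "Therefore".toList _ (by decide),
      replAll_append _ _ "Therefore".toList _ (by decide),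
      replAll_self _ _ _ (by decide),
      replAll_append _ _ "So".toList _ (by decide),
      replAll_append _ _ "So".toList _ (by decide)]

theorem chain_k4 (u : List Char) :
    chainR ("However".toList ++ u) = "But".toList ++ chainR u := by
  unfold chainR
  rw [replAll_append _ _ "However".toList _ (by decide),
      replAll_append _ _ "However".toList _ (by decide),
      replAll_append _ _ "However".toList _ (by decide),
      replAll_self _ _ _ (by decide),
      replAll_append _ _ "But".toList _ (by decide)]

theorem chain_k5 (u : List Char) :
    chainR ("Additionally".toList ++ u) = "Plus".toList ++ chainR u := by
  unfold chainR
  rw [replAll_append _ _ "Additionally".toList _ (by decide),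
      replAll_append _ _ "Additionally".toList _ (by decide),
      replAll_append _ _ "Additionally".toList _ (by decide),
      replAll_append _ _ "Additionally".toList _ (by decide),
      replAll_self _ _ _ (by decide)]

-- one unfolding step of the scan: table hit with a full match
theorem scan_key (c : Char) (f' v u : List Char)
    (hHit : casualHit c = some (c :: f', v)) :
    casualScan ((c :: f') ++ u) = v ++ casualScan u := by
  rw [show (c :: f') ++ u = c :: (f' ++ u) from rfl, casualScan.eq_def]
  simp only [hHit]
  have hp : (c :: f').isPrefixOf (c :: (f' ++ u)) = true :=
    List.isPrefixOf_iff_prefix.mpr (List.prefix_append _ _)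
  simp only [hp, if_true]
  have : List.drop ((c :: f').length - 1) (f' ++ u) = u := by
    simp
  rw [this]

-- one unfolding step of the scan: table hit but no full match
theorem scan_nokey (c : Char) (f v : List Char) (t : List Char)
    (hHit : casualHit c = some (f, v)) (hnp : ¬ f <+: (c :: t)) :
    casualScan (c :: t) = c :: casualScan t := by
  rw [casualScan.eq_def]
  simp only [hHit]
  have : f.isPrefixOf (c :: t) = false := by
    rw [← Bool.not_eq_true, List.isPrefixOf_iff_prefix]
    exact hnp
  simp [this]

-- one unfolding step of the scan: no table hit
theorem scan_none (c : Char) (t : List Char) (hHit : casualHit c = none) :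
    casualScan (c :: t) = c :: casualScan t := by
  rw [casualScan.eq_def]
  simp only [hHit]

theorem main_chain : ∀ n cs, cs.length ≤ n → chainR cs = casualScan cs := by
  intro n
  induction n with
  | zero =>
    intro cs h
    have : cs = [] := by cases cs <;> simp_all
    subst this
    rw [casualScan.eq_def]
    simp [chainR, replAll_nil]
  | succ m ih =>
    intro cs h
    cases cs with
    | nil =>
      rw [casualScan.eq_def]
      simp [chainR, replAll_nil]
    | cons c t =>
    have hlen : t.length ≤ m := by simp at h; omega
    by_cases hc1 : c = 'C'
    · subst hc1
      by_cases hp : "Certainly".toList <+: ('C' :: t)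
      · obtain ⟨u, hu⟩ := hp
        have hul : u.length ≤ m := by
          have := congrArg List.length hu
          simp at this; omega
        rw [← hu, show "Certainly".toList = 'C' :: "ertainly".toList from by decide,
            scan_key 'C' "ertainly".toList "Sure".toList u (by decide),
            show ('C' :: "ertainly".toList) ++ u = "Certainly".toList ++ u from rfl,
            chain_k1, ih u hul]
      · have e : chainR ('C' :: t) = 'C' :: chainR t := by
          unfold chainR
          rw [replAll_step_neg _ _ _ _ hp,
              replAll_head_ne "Furthermore".toList "Also".toList 'F' 'C' _ (by decide) (by decide),
              replAll_head_ne "Therefore".toList "So".toList 'T' 'C' _ (by decide) (by decide),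
              replAll_head_ne "However".toList "But".toList 'H' 'C' _ (by decide) (by decide),
              replAll_head_ne "Additionally".toList "Plus".toList 'A' 'C' _ (by decide) (by decide)]
        rw [e, ih t hlen, scan_nokey 'C' "Certainly".toList "Sure".toList t (by decide) hp]
    · by_cases hc2 : c = 'F'
      · subst hc2
        by_cases hp : "Furthermore".toList <+: ('F' :: t)
        · obtain ⟨u, hu⟩ := hp
          have hul : u.length ≤ m := by
            have := congrArg List.length hu
            simp at this; omega
          rw [← hu, show "Furthermore".toList = 'F' :: "urthermore".toList from by decide,
              scan_key 'F' "urthermore".toList "Also".toList u (by decide),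
              show ('F' :: "urthermore".toList) ++ u = "Furthermore".toList ++ u from rfl,
              chain_k2, ih u hul]
        · have h2 : ¬ "Furthermore".toList <+:
              ('F' :: replAll "Certainly".toList "Sure".toList t) := by
            intro hpre
            rw [show "Furthermore".toList = 'F' :: "urthermore".toList from by decide,
                List.cons_prefix_cons] at hpre
            have := replAll_prefix_reflect "Certainly".toList "Sure".toList (by decide) t.length t "urthermore".toList le_rfl (by simp) hpre.2
            exact hp (by
              rw [show "Furthermore".toList = 'F' :: "urthermore".toList from by decide,
                  List.cons_prefix_cons]
              exact ⟨rfl, this⟩)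
          have e : chainR ('F' :: t) = 'F' :: chainR t := by
            unfold chainR
            rw [replAll_head_ne "Certainly".toList "Sure".toList 'C' 'F' _ (by decide) (by decide),
                replAll_step_neg _ _ _ _ h2,
                replAll_head_ne "Therefore".toList "So".toList 'T' 'F' _ (by decide) (by decide),
                replAll_head_ne "However".toList "But".toList 'H' 'F' _ (by decide) (by decide),
                replAll_head_ne "Additionally".toList "Plus".toList 'A' 'F' _ (by decide) (by decide)]
          rw [e, ih t hlen, scan_nokey 'F' "Furthermore".toList "Also".toList t (by decide) hp]
      · by_cases hc3 : c = 'T'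
        · subst hc3
          by_cases hp : "Therefore".toList <+: ('T' :: t)
          · obtain ⟨u, hu⟩ := hp
            have hul : u.length ≤ m := by
              have := congrArg List.length hu
              simp at this; omega
            rw [← hu, show "Therefore".toList = 'T' :: "herefore".toList from by decide,
                scan_key 'T' "herefore".toList "So".toList u (by decide),
                show ('T' :: "herefore".toList) ++ u = "Therefore".toList ++ u from rfl,
                chain_k3, ih u hul]
          · have h3 : ¬ "Therefore".toList <+:
                ('T' :: replAll "Furthermore".toList "Also".toList
                  (replAll "Certainly".toList "Sure".toList t)) := by
              intro hpre
              rw [show "Therefore".toList = 'T' :: "herefore".toList from by decide,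
                  List.cons_prefix_cons] at hpre
              have s2 := replAll_prefix_reflect "Furthermore".toList "Also".toList (by decide) (replAll "Certainly".toList "Sure".toList t).length (replAll "Certainly".toList "Sure".toList t) "herefore".toList le_rfl (by simp) hpre.2
              have s1 := replAll_prefix_reflect "Certainly".toList "Sure".toList (by decide) t.length t "herefore".toList le_rfl (by simp) s2
              exact hp (by
                rw [show "Therefore".toList = 'T' :: "herefore".toList from by decide,
                    List.cons_prefix_cons]
                exact ⟨rfl, s1⟩)
            have e : chainR ('T' :: t) = 'T' :: chainR t := by
              unfold chainR
              rw [replAll_head_ne "Certainly".toList "Sure".toList 'C' 'T' _ (by decide) (by decide),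
                  replAll_head_ne "Furthermore".toList "Also".toList 'F' 'T' _ (by decide) (by decide),
                  replAll_step_neg _ _ _ _ h3,
                  replAll_head_ne "However".toList "But".toList 'H' 'T' _ (by decide) (by decide),
                  replAll_head_ne "Additionally".toList "Plus".toList 'A' 'T' _ (by decide) (by decide)]
            rw [e, ih t hlen, scan_nokey 'T' "Therefore".toList "So".toList t (by decide) hp]
        · by_cases hc4 : c = 'H'
          · subst hc4
            by_cases hp : "However".toList <+: ('H' :: t)
            · obtain ⟨u, hu⟩ := hp
              have hul : u.length ≤ m := by
                have := congrArg List.length hu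
                simp at this; omega
              rw [← hu, show "However".toList = 'H' :: "owever".toList from by decide,
                  scan_key 'H' "owever".toList "But".toList u (by decide),
                  show ('H' :: "owever".toList) ++ u = "However".toList ++ u from rfl,
                  chain_k4, ih u hul]
            · have h4 : ¬ "However".toList <+:
                  ('H' :: replAll "Therefore".toList "So".toList
                    (replAll "Furthermore".toList "Also".toList
                      (replAll "Certainly".toList "Sure".toList t))) := by
                intro hpre
                rw [show "However".toList = 'H' :: "owever".toList from by decide,
                    List.cons_prefix_cons] at hpre
                have s3 := replAll_prefix_reflect "Therefore".toList "So".toList (by decide) (replAll "Furthermore".toList "Also".toList (replAll "Certainly".toList "Sure".toList t)).length (replAll "Furthermore".toList "Also".toList (replAll "Certainly".toList "Sure".toList t)) "owever".toList le_rfl (by simp) hpre.2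
                have s2 := replAll_prefix_reflect "Furthermore".toList "Also".toList (by decide) (replAll "Certainly".toList "Sure".toList t).length (replAll "Certainly".toList "Sure".toList t) "owever".toList le_rfl (by simp) s3
                have s1 := replAll_prefix_reflect "Certainly".toList "Sure".toList (by decide) t.length t "owever".toList le_rfl (by simp) s2
                exact hp (by
                  rw [show "However".toList = 'H' :: "owever".toList from by decide,
                      List.cons_prefix_cons]
                  exact ⟨rfl, s1⟩)
              have e : chainR ('H' :: t) = 'H' :: chainR t := by
                unfold chainR
                rw [replAll_head_ne "Certainly".toList "Sure".toList 'C' 'H' _ (by decide) (by decide),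
                    replAll_head_ne "Furthermore".toList "Also".toList 'F' 'H' _ (by decide) (by decide),
                    replAll_head_ne "Therefore".toList "So".toList 'T' 'H' _ (by decide) (by decide),
                    replAll_step_neg _ _ _ _ h4,
                    replAll_head_ne "Additionally".toList "Plus".toList 'A' 'H' _ (by decide) (by decide)]
              rw [e, ih t hlen, scan_nokey 'H' "However".toList "But".toList t (by decide) hp]
          · by_cases hc5 : c = 'A'
            · subst hc5
              by_cases hp : "Additionally".toList <+: ('A' :: t)
              · obtain ⟨u, hu⟩ := hp
                have hul : u.length ≤ m := by
                  have := congrArg List.length hu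
                  simp at this; omega
                rw [← hu, show "Additionally".toList = 'A' :: "dditionally".toList from by decide,
                    scan_key 'A' "dditionally".toList "Plus".toList u (by decide),
                    show ('A' :: "dditionally".toList) ++ u = "Additionally".toList ++ u from rfl,
                    chain_k5, ih u hul]
              · have h5 : ¬ "Additionally".toList <+:
                    ('A' :: replAll "However".toList "But".toList
                      (replAll "Therefore".toList "So".toList
                        (replAll "Furthermore".toList "Also".toList
                          (replAll "Certainly".toList "Sure".toList t)))) := by
                  intro hpre
                  rw [show "Additionally".toList = 'A' :: "dditionally".toList from by decide,
                      List.cons_prefix_cons] at hpre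
                  have s4 := replAll_prefix_reflect "However".toList "But".toList (by decide) (replAll "Therefore".toList "So".toList (replAll "Furthermore".toList "Also".toList (replAll "Certainly".toList "Sure".toList t))).length (replAll "Therefore".toList "So".toList (replAll "Furthermore".toList "Also".toList (replAll "Certainly".toList "Sure".toList t))) "dditionally".toList le_rfl (by simp) hpre.2
                  have s3 := replAll_prefix_reflect "Therefore".toList "So".toList (by decide) (replAll "Furthermore".toList "Also".toList (replAll "Certainly".toList "Sure".toList t)).length (replAll "Furthermore".toList "Also".toList (replAll "Certainly".toList "Sure".toList t)) "dditionally".toList le_rfl (by simp) s4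
                  have s2 := replAll_prefix_reflect "Furthermore".toList "Also".toList (by decide) (replAll "Certainly".toList "Sure".toList t).length (replAll "Certainly".toList "Sure".toList t) "dditionally".toList le_rfl (by simp) s3
                  have s1 := replAll_prefix_reflect "Certainly".toList "Sure".toList (by decide) t.length t "dditionally".toList le_rfl (by simp) s2
                  exact hp (by
                    rw [show "Additionally".toList = 'A' :: "dditionally".toList from by decide,
                        List.cons_prefix_cons]
                    exact ⟨rfl, s1⟩)
                have e : chainR ('A' :: t) = 'A' :: chainR t := by
                  unfold chainR
                  rw [replAll_head_ne "Certainly".toList "Sure".toList 'C' 'A' _ (by decide) (by decide),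
                      replAll_head_ne "Furthermore".toList "Also".toList 'F' 'A' _ (by decide) (by decide),
                      replAll_head_ne "Therefore".toList "So".toList 'T' 'A' _ (by decide) (by decide),
                      replAll_head_ne "However".toList "But".toList 'H' 'A' _ (by decide) (by decide),
                      replAll_step_neg _ _ _ _ h5]
                rw [e, ih t hlen, scan_nokey 'A' "Additionally".toList "Plus".toList t (by decide) hp]
            · have e : chainR (c :: t) = c :: chainR t := by
                unfold chainR
                rw [replAll_head_ne "Certainly".toList "Sure".toList 'C' c _ (by decide) (Ne.symm hc1),
                    replAll_head_ne "Furthermore".toList "Also".toList 'F' c _ (by decide) (Ne.symm hc2),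
                    replAll_head_ne "Therefore".toList "So".toList 'T' c _ (by decide) (Ne.symm hc3),
                    replAll_head_ne "However".toList "But".toList 'H' c _ (by decide) (Ne.symm hc4),
                    replAll_head_ne "Additionally".toList "Plus".toList 'A' c _ (by decide) (Ne.symm hc5)]
              have hnone : casualHit c = none := by
                unfold casualHit
                simp [hc1, hc2, hc3, hc4, hc5]
              rw [e, ih t hlen, scan_none c t hnone]

-- ===== VERDICT (by name: the statement is the Claim_ definition above) =====
theorem make_casual_py_spec : Claim_equal_make_casual_py := by
  intro text _
  unfold Spec_make_casual_py make_casual_py make_casual_py_alt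
  apply String.toList_inj.mp
  simp only [PySem.Str.toList_replace, String.toList_ofList]
  rw [replace_eq_replAll _ _ _ (by decide),
      replace_eq_replAll _ _ _ (by decide),
      replace_eq_replAll _ _ _ (by decide),
      replace_eq_replAll _ _ _ (by decide),
      replace_eq_replAll _ _ _ (by decide)]
  exact main_chain text.toList.length text.toList le_rfl
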